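-- pv_equiv track=rewrite | github.com/VerbalAid/Medical_Justifications_Human_vs_LLM_-Corpus_Linguistics- | pipeline/branch_pairs.py | min_hops_upward
-- ===== SOURCE A (Python) =====
-- from collections import defaultdict, deque
--
-- def min_hops_upward(
--     start: str,
--     target: str,
--     parents: dict[str, list[str]],
--     hop_limit: int,
-- ) -> int | None:
--     """Minimum parent-walk hops from start to target (target must be an ancestor)."""
--     if start == target:
--         return 0
--     q: deque[tuple[str, int]] = deque([(start, 0)])
--     seen = {start}
--     while q:
--         n, h = q.popleft()
--         if h >= hop_limit:
--             continue
--         for p in parents.get(n, []):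
--             if p == target:
--                 return h + 1
--             if p not in seen:
--                 seen.add(p)
--                 q.append((p, h + 1))
--     return None
-- ===== SOURCE B (Python) =====
-- def min_hops_upward(
--     start: str,
--     target: str,
--     parents: dict[str, list[str]],
--     hop_limit: int,
-- ) -> int | None:
--     """Monotone set saturation: grow the whole within-k-hops set to a fixpoint.
--
--     No queue, no frontier/visited distinction: one set `reach` of all nodes
--     within `hops` steps, re-expanded wholesale each round until the target
--     shows up among its parents, the set stops growing, or the limit is hit.
--     """
--     if start == target:
--         return 0
--     reach = {start}
--     hops = 0
--     while hops < hop_limit: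
--         step = {p for n in reach for p in parents.get(n, [])}
--         if target in step:
--             return hops + 1
--         grown = reach | step
--         if len(grown) == len(reach):
--             return None
--         reach = grown
--         hops += 1
--     return None
-- ===== Notes on version B (the rewrite author's own statement) =====
-- stated objective: alternative
-- what changed: Replaced the BFS queue of (node, depth) pairs with a monotone fixpoint iteration: a single set of all nodes reachable within k hops is re-expanded wholesale each round (no queue, no frontier/visited distinction), stopping when the target appears among its parents, the set saturates, or the hop limit is reached.
import Mathlib
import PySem

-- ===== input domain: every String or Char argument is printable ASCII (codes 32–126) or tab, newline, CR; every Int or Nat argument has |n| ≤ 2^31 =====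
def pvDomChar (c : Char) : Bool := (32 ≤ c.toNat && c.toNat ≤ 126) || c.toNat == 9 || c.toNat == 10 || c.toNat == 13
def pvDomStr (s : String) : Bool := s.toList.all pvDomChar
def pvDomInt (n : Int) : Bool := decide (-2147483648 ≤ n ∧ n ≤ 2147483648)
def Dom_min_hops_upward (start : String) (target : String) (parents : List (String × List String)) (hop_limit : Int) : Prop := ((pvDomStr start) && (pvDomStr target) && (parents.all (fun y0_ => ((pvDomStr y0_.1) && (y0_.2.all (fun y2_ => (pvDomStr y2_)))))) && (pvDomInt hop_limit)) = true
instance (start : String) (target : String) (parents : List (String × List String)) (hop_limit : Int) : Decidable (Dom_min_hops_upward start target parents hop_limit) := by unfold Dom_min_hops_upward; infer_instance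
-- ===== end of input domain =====

-- B replaces A's BFS queue of (node, depth) pairs by a monotone fixpoint iteration over a single
-- reachable-within-k-hops set (no queue, no frontier/visited distinction); objective: alternative.

-- `parents.get(n, [])` on the association list (dict → assoc list, first match); shared by both ports.
def pvParentsOf (parents : List (String × List String)) (n : String) : List String :=
  (List.lookup n parents).getD []

-- ---- termination bookkeeping (cited by the ports' `decreasing_by`) ----

-- all strings that can ever be newly discovered (every parent list, flattened)
def pvUniverse (parents : List (String × List String)) : List String :=
  (parents.map Prod.snd).flatten

def pvUnseen (parents : List (String × List String)) (seen : List String) : Nat :=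
  ((pvUniverse parents).filter (fun x => decide (x ∉ seen))).length

theorem pvParentsOf_subset {parents : List (String × List String)} {n x : String}
    (hx : x ∈ pvParentsOf parents n) : x ∈ pvUniverse parents := by
  induction parents with
  | nil => simp [pvParentsOf, List.lookup] at hx
  | cons kv rest ih =>
    obtain ⟨k, v⟩ := kv
    simp only [pvParentsOf, List.lookup] at hx
    by_cases hk : n == k
    · simp [hk] at hx
      simp [pvUniverse, hx]
    · simp [hk] at hx
      have := ih (by simpa [pvParentsOf] using hx)
      simp [pvUniverse] at this ⊢
      exact Or.inr this

theorem pvUnseen_append {parents : List (String × List String)} {seen δ : List String}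
    (hnd : δ.Nodup) (hδ : ∀ x ∈ δ, x ∉ seen ∧ x ∈ pvUniverse parents) :
    pvUnseen parents (seen ++ δ) + δ.length ≤ pvUnseen parents seen := by
  classical
  have hsplit : pvUnseen parents (seen ++ δ)
      = (((pvUniverse parents).filter (fun x => decide (x ∉ seen))).filter (fun x => decide (x ∉ δ))).length := by
    unfold pvUnseen
    rw [List.filter_filter]
    congr 1
    apply List.filter_congr
    intro x _
    by_cases h1 : x ∈ seen <;> by_cases h2 : x ∈ δ <;> simp [h1, h2]
  have hsub : δ ⊆ ((pvUniverse parents).filter (fun x => decide (x ∉ seen))).filter (fun x => decide (x ∈ δ)) := by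
    intro x hxδ
    have := hδ x hxδ
    simp [List.mem_filter, this.1, this.2, hxδ]
  have hlen : δ.length ≤ (((pvUniverse parents).filter (fun x => decide (x ∉ seen))).filter (fun x => decide (x ∈ δ))).length :=
    (hnd.subperm hsub).length_le
  have htot := List.length_eq_length_filter_add
    (l := (pvUniverse parents).filter (fun x => decide (x ∉ seen))) (fun x => decide (x ∈ δ))
  have hneg : (((pvUniverse parents).filter (fun x => decide (x ∉ seen))).filter (!(fun x => decide (x ∈ δ)) ·))
      = (((pvUniverse parents).filter (fun x => decide (x ∉ seen))).filter (fun x => decide (x ∉ δ))) := by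
    apply List.filter_congr
    intro x _
    by_cases h2 : x ∈ δ <;> simp [h2]
  rw [hneg] at htot
  rw [hsplit]
  unfold pvUnseen
  omega

-- ===== PORT A =====
-- literal transliteration of A: a deque of (node, depth) pairs and a seen set;
-- `seen.add(p)` appears as `seen ++ [p]` because `p ∉ seen` was just checked (= PySem.Set.add_of_not_mem).

-- the `for p in parents.get(n, [])` body: early `return h + 1`, else enqueue unseen parents
def aInner (target : String) (h : Int) :
    List String → List (String × Int) → PySem.Set String → Sum Int (List (String × Int) × List String)
  | [], q, seen => Sum.inr (q, seen)
  | p :: ps, q, seen =>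
    if p = target then Sum.inl (h + 1)
    else if p ∈ seen then aInner target h ps q seen
    else aInner target h ps (q ++ [(p, h + 1)]) (seen ++ [p])

theorem aInner_inr (target : String) (h : Int) :
    ∀ ps q (seen : List String) q' seen',
      aInner target h ps q seen = Sum.inr (q', seen') →
      ∃ δ : List String, q' = q ++ δ.map (fun p => (p, h + 1)) ∧ seen' = seen ++ δ ∧
        δ.Nodup ∧ ∀ x ∈ δ, x ∉ seen ∧ x ∈ ps := by
  intro ps
  induction ps with
  | nil =>
    intro q seen q' seen' heq
    simp [aInner] at heq
    exact ⟨[], by simp [heq.1, heq.2]⟩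
  | cons p ps ih =>
    intro q seen q' seen' heq
    simp only [aInner] at heq
    by_cases hpt : p = target
    · simp [hpt] at heq
    · simp only [if_neg hpt] at heq
      by_cases hps : p ∈ seen
      · obtain ⟨δ, h1, h2, h3, h4⟩ := ih _ _ _ _ (by simpa [hps] using heq)
        exact ⟨δ, h1, h2, h3, fun x hx => ⟨(h4 x hx).1, List.mem_cons_of_mem _ (h4 x hx).2⟩⟩
      · obtain ⟨δ, h1, h2, h3, h4⟩ := ih _ _ _ _ (by simpa [hps] using heq)
        refine ⟨p :: δ, ?_, ?_, ?_, ?_⟩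
        · simp [h1, List.append_assoc]
        · simp [h2, List.append_assoc]
        · exact List.nodup_cons.2 ⟨fun hpδ => by simpa using ((h4 p hpδ).1 (by simp)), h3⟩
        · intro x hx
          rcases List.mem_cons.1 hx with rfl | hx
          · exact ⟨hps, by simp⟩
          · have := h4 x hx
            exact ⟨fun hxs => this.1 (by simp [hxs]), List.mem_cons_of_mem _ this.2⟩

-- the `while q:` loop of A
def aLoop (target : String) (parents : List (String × List String)) (hop_limit : Int) :
    List (String × Int) → PySem.Set String → Option Int
  | [], _ => none
  | (n, h) :: rest, seen =>
    if h ≥ hop_limit then aLoop target parents hop_limit rest seen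
    else
      match ha : aInner target h (pvParentsOf parents n) rest seen with
      | Sum.inl r => some r
      | Sum.inr (q', seen') => aLoop target parents hop_limit q' seen'
termination_by q seen => 2 * pvUnseen parents seen + q.length
decreasing_by
  · simp
  · obtain ⟨δ, h1, h2, h3, h4⟩ := aInner_inr target h _ _ _ _ _ ha
    have hδ : ∀ x ∈ δ, x ∉ seen ∧ x ∈ pvUniverse parents :=
      fun x hx => ⟨(h4 x hx).1, pvParentsOf_subset (h4 x hx).2⟩
    have := pvUnseen_append h3 hδ
    subst h1 h2
    simp only [List.length_append, List.length_map, List.length_cons]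
    omega

def min_hops_upward (start : String) (target : String) (parents : List (String × List String)) (hop_limit : Int) : Option Int :=
  if start = target then some 0
  else aLoop target parents hop_limit [(start, 0)] [start]

-- ===== PORT B =====
-- fixpoint saturation from Source B: `step = {p for n in reach for p in parents.get(n, [])}`
-- is Set.ofList of the flattened parent lists; `reach | step` is Set.union.

def bStep (parents : List (String × List String)) (reach : PySem.Set String) : PySem.Set String :=
  PySem.Set.ofList (reach.flatMap (fun n => pvParentsOf parents n))

-- B's union step, split into old elements and the genuinely new ones (cited by bLoop's decreasing_by)
theorem union_split (reach : PySem.Set String) (step : PySem.Set String) (hnd : step.Nodup) :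
    PySem.Set.union reach step = reach ++ step.filter (fun y => !reach.contains y) := by
  have h := PySem.Set.update_eq_append_filter reach step
  rw [PySem.Set.ofList_eq_self_of_nodup step hnd] at h
  exact h

-- the `while hops < hop_limit:` loop of B
def bLoop (target : String) (parents : List (String × List String)) (hop_limit : Int) :
    PySem.Set String → Int → Option Int
  | reach, hops =>
    if hops ≥ hop_limit then none
    else
      let step := bStep parents reach
      if target ∈ step then some (hops + 1)
      else
        let grown := PySem.Set.union reach step
        if grown.length = reach.length then none
        else bLoop target parents hop_limit grown (hops + 1)
termination_by reach hops => pvUnseen parents reach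
decreasing_by
  rename_i hlen
  have hu := union_split reach (bStep parents reach) (PySem.Set.nodup_ofList _)
  set δ := (bStep parents reach).filter (fun y => !reach.contains y) with hδdef
  have hδmem : ∀ x ∈ δ, x ∉ reach ∧ x ∈ pvUniverse parents := by
    intro x hx
    have hx' := List.mem_filter.1 hx
    constructor
    · intro hxr
      rw [(PySem.Set.contains_iff reach x).2 hxr] at hx'
      simp at hx'
    · have hx1 : x ∈ PySem.Set.ofList (reach.flatMap (fun n => pvParentsOf parents n)) := hx'.1
      obtain ⟨n, _, hn⟩ := List.mem_flatMap.1 ((PySem.Set.mem_ofList _ _).1 hx1)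
      exact pvParentsOf_subset hn
  have hδnd : δ.Nodup := (PySem.Set.nodup_ofList _).filter _
  have hlen' : ¬ (PySem.Set.union reach (bStep parents reach)).length = reach.length := hlen
  have hδne : δ ≠ [] := fun hnil => hlen' (by rw [hu, hnil, List.append_nil])
  have hle := pvUnseen_append hδnd hδmem
  have hpos : 0 < δ.length := List.length_pos_iff.2 hδne
  show pvUnseen parents (PySem.Set.union reach (bStep parents reach)) < pvUnseen parents reach
  rw [hu]
  omega

def min_hops_upward_alt (start : String) (target : String) (parents : List (String × List String)) (hop_limit : Int) : Option Int :=
  if start = target then some 0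
  else bLoop target parents hop_limit [start] 0

-- ===== PRECONDITION & SPEC =====
def Spec_min_hops_upward (start : String) (target : String) (parents : List (String × List String)) (hop_limit : Int) (out : Option Int) : Prop := out = min_hops_upward_alt start target parents hop_limit
instance (start : String) (target : String) (parents : List (String × List String)) (hop_limit : Int) (out : Option Int) : Decidable (Spec_min_hops_upward start target parents hop_limit out) := by unfold Spec_min_hops_upward; infer_instance

-- ===== CLAIM (what is proved, stated in full; the proofs are below) =====
def Claim_equal_min_hops_upward : Prop := ∀ (start : String) (target : String) (parents : List (String × List String)) (hop_limit : Int), Dom_min_hops_upward start target parents hop_limit → Spec_min_hops_upward start target parents hop_limit (min_hops_upward start target parents hop_limit)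

-- ===== LEMMAS AND PROOFS =====

-- proof-side description of A's processing of one whole level (not used by either port):
-- bExpandPs/bExpand replay A's seen-guarded expansion of a frontier

def bExpandPs : List String → List String → PySem.Set String → List String × List String
  | [], nf, seen => (nf, seen)
  | p :: ps, nf, seen =>
    if p ∈ seen then bExpandPs ps nf seen
    else bExpandPs ps (nf ++ [p]) (seen ++ [p])

def bExpand (parents : List (String × List String)) :
    List String → List String → PySem.Set String → List String × List String
  | [], nf, seen => (nf, seen)
  | n :: rest, nf, seen =>
    let r := bExpandPs (pvParentsOf parents n) nf seen
    bExpand parents rest r.1 r.2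

theorem bExpandPs_char :
    ∀ ps nf (seen : List String),
      ∃ δ : List String, (bExpandPs ps nf seen).1 = nf ++ δ ∧ (bExpandPs ps nf seen).2 = seen ++ δ ∧
        δ.Nodup ∧ ∀ x ∈ δ, x ∉ seen ∧ x ∈ ps := by
  intro ps
  induction ps with
  | nil => intro nf seen; exact ⟨[], by simp [bExpandPs]⟩
  | cons p ps ih =>
    intro nf seen
    simp only [bExpandPs]
    by_cases hps : p ∈ seen
    · obtain ⟨δ, h1, h2, h3, h4⟩ := ih nf seen
      exact ⟨δ, by simp [hps, h1], by simp [hps, h2], h3,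
        fun x hx => ⟨(h4 x hx).1, List.mem_cons_of_mem _ (h4 x hx).2⟩⟩
    · obtain ⟨δ, h1, h2, h3, h4⟩ := ih (nf ++ [p]) (seen ++ [p])
      refine ⟨p :: δ, by simp [hps, h1, List.append_assoc], by simp [hps, h2, List.append_assoc], ?_, ?_⟩
      · exact List.nodup_cons.2 ⟨fun hpδ => by simpa using ((h4 p hpδ).1 (by simp)), h3⟩
      · intro x hx
        rcases List.mem_cons.1 hx with rfl | hx
        · exact ⟨hps, by simp⟩
        · have := h4 x hx
          exact ⟨fun hxs => this.1 (by simp [hxs]), List.mem_cons_of_mem _ this.2⟩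

theorem bExpand_char (parents : List (String × List String)) :
    ∀ frontier nf (seen : List String),
      ∃ δ : List String, (bExpand parents frontier nf seen).1 = nf ++ δ ∧
        (bExpand parents frontier nf seen).2 = seen ++ δ ∧
        δ.Nodup ∧ ∀ x ∈ δ, x ∉ seen ∧ x ∈ pvUniverse parents := by
  intro frontier
  induction frontier with
  | nil => intro nf seen; exact ⟨[], by simp [bExpand]⟩
  | cons n rest ih =>
    intro nf seen
    simp only [bExpand]
    obtain ⟨δ1, e1, e2, e3, e4⟩ := bExpandPs_char (pvParentsOf parents n) nf seen
    obtain ⟨δ2, f1, f2, f3, f4⟩ := ih (bExpandPs (pvParentsOf parents n) nf seen).1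
      (bExpandPs (pvParentsOf parents n) nf seen).2
    refine ⟨δ1 ++ δ2, ?_, ?_, ?_, ?_⟩
    · rw [f1, e1, List.append_assoc]
    · rw [f2, e2, List.append_assoc]
    · refine List.Nodup.append e3 f3 ?_
      intro x hx1 hx2
      exact (f4 x hx2).1 (by simp [e2, hx1])
    · intro x hx
      rcases List.mem_append.1 hx with hx | hx
      · exact ⟨(e4 x hx).1, pvParentsOf_subset (e4 x hx).2⟩
      · have := f4 x hx
        exact ⟨fun hxs => this.1 (by simp [e2, hxs]), this.2⟩

theorem bExpandPs_mem :
    ∀ ps nf (seen : List String) (x : String),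
      x ∈ (bExpandPs ps nf seen).2 ↔ x ∈ seen ∨ x ∈ ps := by
  intro ps
  induction ps with
  | nil => intro nf seen x; simp [bExpandPs]
  | cons p ps ih =>
    intro nf seen x
    simp only [bExpandPs]
    by_cases hps : p ∈ seen
    · rw [if_pos hps, ih]
      constructor
      · rintro (h | h) <;> simp [h]
      · rintro (h | h)
        · exact Or.inl h
        · rcases List.mem_cons.1 h with rfl | h
          · exact Or.inl hps
          · exact Or.inr h
    · rw [if_neg hps, ih]
      constructor
      · rintro (h | h)
        · rcases List.mem_append.1 h with h | h
          · exact Or.inl h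
          · simp at h; simp [h]
        · simp [h]
      · rintro (h | h)
        · exact Or.inl (by simp [h])
        · rcases List.mem_cons.1 h with rfl | h
          · exact Or.inl (by simp)
          · exact Or.inr h

theorem bExpand_mem (parents : List (String × List String)) :
    ∀ frontier nf (seen : List String) (x : String),
      x ∈ (bExpand parents frontier nf seen).2 ↔
        x ∈ seen ∨ ∃ n ∈ frontier, x ∈ pvParentsOf parents n := by
  intro frontier
  induction frontier with
  | nil => intro nf seen x; simp [bExpand]
  | cons n rest ih =>
    intro nf seen x
    simp only [bExpand]
    rw [ih, bExpandPs_mem]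
    constructor
    · rintro ((h | h) | ⟨m, hm, hx⟩)
      · exact Or.inl h
      · exact Or.inr ⟨n, by simp, h⟩
      · exact Or.inr ⟨m, by simp [hm], hx⟩
    · rintro (h | ⟨m, hm, hx⟩)
      · exact Or.inl (Or.inl h)
      · rcases List.mem_cons.1 hm with rfl | hm
        · exact Or.inl (Or.inr hx)
        · exact Or.inr ⟨m, hm, hx⟩

-- A's inner scan returns h+1 as soon as the parent list contains the target
theorem aInner_of_target (target : String) (h : Int) :
    ∀ ps q (seen : List String), target ∈ ps → aInner target h ps q seen = Sum.inl (h + 1) := by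
  intro ps
  induction ps with
  | nil => intro q seen hx; simp at hx
  | cons p ps ih =>
    intro q seen hx
    simp only [aInner]
    by_cases hpt : p = target
    · simp [hpt]
    · have hx' : target ∈ ps := by
        rcases List.mem_cons.1 hx with h' | h'
        · exact absurd h'.symm hpt
        · exact h'
      by_cases hps : p ∈ seen <;> simp [hpt, hps, ih _ _ hx']

-- A's inner scan without the target is exactly the seen-guarded expansion of one parent list
theorem aInner_eq_expand (target : String) (h : Int) :
    ∀ ps (base : List (String × Int)) nf (seen : List String), target ∉ ps →
      aInner target h ps (base ++ nf.map (fun p => (p, h + 1))) seen =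
        Sum.inr (base ++ ((bExpandPs ps nf seen).1).map (fun p => (p, h + 1)), (bExpandPs ps nf seen).2) := by
  intro ps
  induction ps with
  | nil => intro base nf seen _; simp [aInner, bExpandPs]
  | cons p ps ih =>
    intro base nf seen hnt
    have hpt : p ≠ target := fun hp => hnt (by simp [hp])
    have hnt' : target ∉ ps := fun hp => hnt (by simp [hp])
    simp only [aInner, bExpandPs, if_neg hpt]
    by_cases hps : p ∈ seen
    · simp [hps, ih base nf seen hnt']
    · have := ih base (nf ++ [p]) (seen ++ [p]) hnt'
      simp only [if_neg hps]
      rw [← this]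
      congr 1
      simp [List.append_assoc]

-- a queue whose entries all sit at depth h ≥ hop_limit is drained to None
theorem aLoop_drain (target : String) (parents : List (String × List String)) (hop_limit : Int)
    (h : Int) (hge : h ≥ hop_limit) :
    ∀ (frontier : List String) (seen : List String),
      aLoop target parents hop_limit (frontier.map (fun n => (n, h))) seen = none := by
  intro frontier
  induction frontier with
  | nil => intro seen; simp [aLoop]
  | cons n rest ih => intro seen; simp only [List.map_cons]; rw [aLoop]; simp [hge, ih]

-- if some frontier node has the target as a parent, A returns h+1 while draining the level
theorem aLoop_hit (target : String) (parents : List (String × List String)) (hop_limit : Int)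
    (h : Int) (hlt : ¬ h ≥ hop_limit) :
    ∀ (rest : List String) (nf : List String) (seen : List String), (∃ n ∈ rest, target ∈ pvParentsOf parents n) →
      aLoop target parents hop_limit
        (rest.map (fun n => (n, h)) ++ nf.map (fun p => (p, h + 1))) seen = some (h + 1) := by
  intro rest
  induction rest with
  | nil => intro nf seen hex; simp at hex
  | cons n rest ih =>
    intro nf seen hex
    simp only [List.map_cons, List.cons_append]
    rw [aLoop]
    simp only [if_neg hlt]
    by_cases hn : target ∈ pvParentsOf parents n
    · rw [aInner_of_target target h _ _ _ hn]
    · have hex' : ∃ m ∈ rest, target ∈ pvParentsOf parents m := by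
        rcases hex with ⟨m, hm, hmt⟩
        rcases List.mem_cons.1 hm with rfl | hm'
        · exact absurd hmt hn
        · exact ⟨m, hm', hmt⟩
      rw [aInner_eq_expand target h _ _ _ _ hn]
      exact ih _ _ hex'

-- if no frontier node has the target as a parent, draining the level in A is one bExpand
theorem aLoop_bridge (target : String) (parents : List (String × List String)) (hop_limit : Int)
    (h : Int) (hlt : ¬ h ≥ hop_limit) :
    ∀ (rest : List String) (nf : List String) (seen : List String), (∀ n ∈ rest, target ∉ pvParentsOf parents n) →
      aLoop target parents hop_limit
        (rest.map (fun n => (n, h)) ++ nf.map (fun p => (p, h + 1))) seen =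
      aLoop target parents hop_limit
        (((bExpand parents rest nf seen).1).map (fun p => (p, h + 1)))
        (bExpand parents rest nf seen).2 := by
  intro rest
  induction rest with
  | nil => intro nf seen _; simp [bExpand]
  | cons n rest ih =>
    intro nf seen hno
    simp only [List.map_cons, List.cons_append]
    rw [aLoop]
    simp only [if_neg hlt]
    rw [aInner_eq_expand target h _ _ _ _ (hno n (by simp))]
    exact ih (bExpandPs (pvParentsOf parents n) nf seen).1
      (bExpandPs (pvParentsOf parents n) nf seen).2 (fun m hm => hno m (by simp [hm]))

-- membership in B's step set
theorem mem_bStep (parents : List (String × List String)) (reach : PySem.Set String) (x : String) :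
    x ∈ bStep parents reach ↔ ∃ n ∈ reach, x ∈ pvParentsOf parents n := by
  unfold bStep
  rw [PySem.Set.mem_ofList]
  exact List.mem_flatMap

-- main bisimulation: A's queue holding one whole level equals B's saturation loop, under the
-- invariant that seen/reach agree as sets, the frontier is inside seen, and every non-frontier
-- seen node is fully processed (its parents are all seen and none of them is the target).
theorem main_level (target : String) (parents : List (String × List String)) (hop_limit : Int) :
    ∀ (m : Nat) (F S R : List String) (h : Int),
      pvUnseen parents R < m →
      (∀ x, x ∈ S ↔ x ∈ R) →
      (∀ n ∈ F, n ∈ S) →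
      (∀ n ∈ S, n ∉ F → target ∉ pvParentsOf parents n ∧ ∀ p ∈ pvParentsOf parents n, p ∈ S) →
      aLoop target parents hop_limit (F.map (fun n => (n, h))) S =
        bLoop target parents hop_limit R h := by
  intro m
  induction m with
  | zero => intro F S R h hm; exact absurd hm (Nat.not_lt_zero _)
  | succ m ih =>
    intro F S R h hm hmem hFS hclosed
    rw [bLoop]
    by_cases hge : h ≥ hop_limit
    · rw [if_pos hge]
      exact aLoop_drain target parents hop_limit h hge F S
    · rw [if_neg hge]
      simp only []
      by_cases hhit : ∃ n ∈ F, target ∈ pvParentsOf parents n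
      · -- the target is a parent of some frontier node: both return h + 1
        have hstep : target ∈ bStep parents R := by
          obtain ⟨n, hnF, hnt⟩ := hhit
          exact (mem_bStep parents R target).2 ⟨n, (hmem n).1 (hFS n hnF), hnt⟩
        rw [if_pos hstep]
        simpa using aLoop_hit target parents hop_limit h hge F [] S hhit
      · -- no frontier node has the target as a parent
        push_neg at hhit
        have hnostep : target ∉ bStep parents R := by
          intro ht
          obtain ⟨n, hnR, hnt⟩ := (mem_bStep parents R target).1 ht
          have hnS : n ∈ S := (hmem n).2 hnR
          by_cases hnF : n ∈ F
          · exact hhit n hnF hnt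
          · exact (hclosed n hnS hnF).1 hnt
        rw [if_neg hnostep]
        -- A processes the whole level: new frontier F' and seen S' from bExpand
        have hbridge := aLoop_bridge target parents hop_limit h hge F [] S hhit
        simp only [List.map_nil, List.append_nil, List.nil_append] at hbridge
        obtain ⟨δA, hA1, hA2, hA3, hA4⟩ := bExpand_char parents F [] S
        simp only [List.nil_append] at hA1
        -- B grows reach by the genuinely new elements δB
        have hndstep : (bStep parents R).Nodup := PySem.Set.nodup_ofList _
        have hu := union_split R (bStep parents R) hndstep
        set δB := (bStep parents R).filter (fun y => !PySem.Set.contains R y) with hδB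
        have hδBmem : ∀ x ∈ δB, x ∉ R ∧ x ∈ bStep parents R := by
          intro x hx
          have hx' := List.mem_filter.1 hx
          refine ⟨fun hxr => ?_, hx'.1⟩
          have hc := hx'.2
          simp at hc
          exact hc hxr
        -- membership of A's new seen S' equals membership of B's grown reach
        have hmem' : ∀ x, x ∈ (bExpand parents F [] S).2 ↔ x ∈ PySem.Set.union R (bStep parents R) := by
          intro x
          rw [bExpand_mem, hu]
          constructor
          · rintro (hx | ⟨n, hnF, hx⟩)
            · exact List.mem_append.2 (Or.inl ((hmem x).1 hx))
            · have hxs : x ∈ bStep parents R :=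
                (mem_bStep parents R x).2 ⟨n, (hmem n).1 (hFS n hnF), hx⟩
              by_cases hxR : x ∈ R
              · exact List.mem_append.2 (Or.inl hxR)
              · refine List.mem_append.2 (Or.inr (List.mem_filter.2 ⟨hxs, ?_⟩))
                simpa using hxR
          · intro hx
            rcases List.mem_append.1 hx with hx | hx
            · exact Or.inl ((hmem x).2 hx)
            · obtain ⟨n, hnR, hn⟩ := (mem_bStep parents R x).1 (hδBmem x hx).2
              have hnS : n ∈ S := (hmem n).2 hnR
              by_cases hnF : n ∈ F
              · exact Or.inr ⟨n, hnF, hn⟩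
              · exact Or.inl ((hclosed n hnS hnF).2 x hn)
        by_cases hsat : (PySem.Set.union R (bStep parents R)).length = R.length
        · -- saturated: δB = [], so nothing new was found; A's next frontier is empty too
          rw [if_pos hsat]
          have hδBnil : δB = [] := by
            have hlen := congrArg List.length hu
            rw [List.length_append, hsat] at hlen
            exact List.eq_nil_of_length_eq_zero (by omega)
          have hAδnil : δA = [] := by
            cases hδA : δA with
            | nil => rfl
            | cons d t =>
              exfalso
              have hdS' : d ∈ (bExpand parents F [] S).2 := by rw [hA2, hδA]; simp
              have hdU : d ∈ PySem.Set.union R (bStep parents R) := (hmem' d).1 hdS'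
              rw [hu, hδBnil, List.append_nil] at hdU
              exact (hA4 d (by rw [hδA]; simp)).1 ((hmem d).2 hdU)
          rw [hbridge, hA1, hAδnil]
          simp [aLoop]
        · -- not saturated: both recurse; re-establish the invariant one level up
          rw [if_neg hsat]
          rw [hbridge, hA1]
          have hδBnd : δB.Nodup := hndstep.filter _
          have hδBne : δB ≠ [] := by
            intro hnil
            exact hsat (by rw [hu, hnil, List.append_nil])
          have hδBuniv : ∀ x ∈ δB, x ∉ R ∧ x ∈ pvUniverse parents := by
            intro x hx
            obtain ⟨n, _, hn⟩ := (mem_bStep parents R x).1 (hδBmem x hx).2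
            exact ⟨(hδBmem x hx).1, pvParentsOf_subset hn⟩
          have hless : pvUnseen parents (PySem.Set.union R (bStep parents R)) < pvUnseen parents R := by
            have hle := pvUnseen_append hδBnd hδBuniv
            have hpos : 0 < δB.length := List.length_pos_iff.2 hδBne
            rw [hu]
            omega
          apply ih δA (bExpand parents F [] S).2 (PySem.Set.union R (bStep parents R)) (h + 1)
          · omega
          · exact hmem'
          · intro n hn
            rw [hA2]
            exact List.mem_append.2 (Or.inr hn)
          · -- closure for the new seen set
            intro n hnS' hnF'
            have hnS : n ∈ S := by
              rw [hA2] at hnS'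
              rcases List.mem_append.1 hnS' with hx | hx
              · exact hx
              · exact absurd hx hnF'
            by_cases hnF : n ∈ F
            · refine ⟨hhit n hnF, ?_⟩
              intro p hp
              have : p ∈ S ∨ ∃ m ∈ F, p ∈ pvParentsOf parents m := Or.inr ⟨n, hnF, hp⟩
              exact (bExpand_mem parents F [] S p).2 this
            · obtain ⟨ht, hsub⟩ := hclosed n hnS hnF
              refine ⟨ht, fun p hp => ?_⟩
              exact (bExpand_mem parents F [] S p).2 (Or.inl (hsub p hp))

-- ===== VERDICT (by name: the statement is the Claim_ definition above) =====
theorem min_hops_upward_spec : Claim_equal_min_hops_upward := by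
  intro start target parents hop_limit _
  unfold Spec_min_hops_upward min_hops_upward min_hops_upward_alt
  by_cases hst : start = target
  · simp [hst]
  · simp only [if_neg hst]
    exact main_level target parents hop_limit (pvUnseen parents [start] + 1)
      [start] [start] [start] 0 (Nat.lt_succ_self _) (fun x => Iff.rfl) (fun n hn => hn)
      (fun n hn hnF => absurd hn hnF)
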